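-- pv_equiv track=rewrite | github.com/pyRis/retrofitting-embeddings-lrls | src/graph_embeds/ppmi_generator.py | process_conceptnet_language_specific
-- ===== SOURCE A (Python) =====
-- def process_conceptnet_language_specific(conceptnet_data, language):
--     """
--     Process ConceptNet data to extract relationships for a specific language and prepare for PPMI computation.
--
--     Args:
--     - data: A dictionary containing ConceptNet data.
--
--     Returns:
--     A dictionary prepared for PPMI computation.
--     """
--
--     data_ppmi = {}
--     for key, values in conceptnet_data[language].items():
--         new_values = []
--         for value in values:
--             words = value.split()
--             new_values.extend(words)
--         data_ppmi[key] = new_values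
--
--     data_ppmi
--
--     return data_ppmi
-- ===== SOURCE B (Python) =====
-- def process_conceptnet_language_specific(conceptnet_data, language):
--     # Alternative algorithm: a hand-rolled character-level state machine that
--     # tokenizes each key's strings in one streaming pass (current-word buffer +
--     # flush on whitespace / end of string), instead of calling str.split per string.
--     data_ppmi = {}
--     for key, values in conceptnet_data[language].items():
--         tokens = []
--         cur = []
--         for value in values:
--             for ch in value:
--                 if ch.isspace():
--                     if cur:
--                         tokens.append("".join(cur))
--                         cur = []
--                 else:
--                     cur.append(ch)
--             if cur:
--                 tokens.append("".join(cur))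
--                 cur = []
--         data_ppmi[key] = tokens
--     return data_ppmi
-- ===== Notes on version B (the rewrite author's own statement) =====
-- stated objective: alternative
-- what changed: Replaces per-string str.split()+extend with a hand-rolled character-level state machine that streams over each key's strings with a current-word buffer and flushes tokens on whitespace or string end.
import Mathlib
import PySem

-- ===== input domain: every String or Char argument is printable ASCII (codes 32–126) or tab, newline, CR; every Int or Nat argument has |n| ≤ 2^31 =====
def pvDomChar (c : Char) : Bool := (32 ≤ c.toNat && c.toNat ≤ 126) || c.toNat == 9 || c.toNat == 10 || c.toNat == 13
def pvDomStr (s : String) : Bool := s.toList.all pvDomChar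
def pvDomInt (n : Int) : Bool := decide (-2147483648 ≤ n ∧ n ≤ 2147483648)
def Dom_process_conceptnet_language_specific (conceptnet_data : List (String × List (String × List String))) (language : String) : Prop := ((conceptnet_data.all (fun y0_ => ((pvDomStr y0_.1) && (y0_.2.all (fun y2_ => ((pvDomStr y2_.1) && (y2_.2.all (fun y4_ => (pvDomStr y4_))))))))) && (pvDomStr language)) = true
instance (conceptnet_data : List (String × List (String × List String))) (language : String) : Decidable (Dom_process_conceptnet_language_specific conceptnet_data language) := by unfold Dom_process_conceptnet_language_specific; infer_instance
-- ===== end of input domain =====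

-- B replaces A's per-string split()+extend with a character-level state machine
-- (current-word buffer, flushed on whitespace or string end); objective: alternative.

-- ===== PORT A =====
def process_conceptnet_language_specific (conceptnet_data : List (String × List (String × List String))) (language : String) : List (String × List String) :=
  match (PySem.Dict.mk conceptnet_data).get? language with
  | none => []   -- unreachable under Pre_ (Python raises KeyError here)
  | some inner =>
    -- data_ppmi = {}; for key, values in …items(): new_values = []; for value in values: new_values.extend(value.split()); data_ppmi[key] = new_values
    (inner.foldl (fun d kv =>
        d.insert kv.1 (kv.2.foldl (fun nv v => nv ++ PySem.Str.split₀ v) []))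
      PySem.Dict.empty).items

-- ===== PORT B =====
-- inner char loop of Source B plus the post-loop flush: state = (tokens, cur);
-- ch.isspace() is PySem.Chars.isspace (exact on the ASCII/tab/NL/CR domain)
def pvTokChars : List Char → List Char → List String → List String
  | [], cur, tokens => if cur.isEmpty then tokens else tokens ++ [String.ofList cur]
  | c :: rest, cur, tokens =>
      if PySem.Chars.isspace c then
        (if cur.isEmpty then pvTokChars rest [] tokens
         else pvTokChars rest [] (tokens ++ [String.ofList cur]))
      else pvTokChars rest (cur ++ [c]) tokens

def process_conceptnet_language_specific_alt (conceptnet_data : List (String × List (String × List String))) (language : String) : List (String × List String) :=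
  match (PySem.Dict.mk conceptnet_data).get? language with
  | none => []   -- unreachable under Pre_
  | some inner =>
    -- for key, values: tokens=[]; cur=[]; for value: <char loop + flush>  (cur is [] again after each value)
    (inner.foldl (fun d kv =>
        d.insert kv.1 (kv.2.foldl (fun tokens v => pvTokChars v.toList [] tokens) []))
      PySem.Dict.empty).items

-- ===== PRECONDITION & SPEC =====
-- Pre_ excludes exactly the inputs where Python A raises KeyError: language not a key of conceptnet_data.
def Pre_process_conceptnet_language_specific (conceptnet_data : List (String × List (String × List String))) (language : String) : Prop :=
  ((PySem.Dict.mk conceptnet_data).get? language).isSome = true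
instance (conceptnet_data : List (String × List (String × List String))) (language : String) : Decidable (Pre_process_conceptnet_language_specific conceptnet_data language) := by unfold Pre_process_conceptnet_language_specific; infer_instance
def pvWitness_process_conceptnet_language_specific : (List (String × List (String × List String))) × String :=
  ([("en", [("cat", ["a b", " c "])])], "en")

def Spec_process_conceptnet_language_specific (conceptnet_data : List (String × List (String × List String))) (language : String) (out : List (String × List String)) : Prop := out = process_conceptnet_language_specific_alt conceptnet_data language
instance (conceptnet_data : List (String × List (String × List String))) (language : String) (out : List (String × List String)) : Decidable (Spec_process_conceptnet_language_specific conceptnet_data language out) := by unfold Spec_process_conceptnet_language_specific; infer_instance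

-- ===== CLAIM (what is proved, stated in full; the proofs are below) =====
def Claim_equal_process_conceptnet_language_specific : Prop := ∀ (conceptnet_data : List (String × List (String × List String))) (language : String), Dom_process_conceptnet_language_specific conceptnet_data language → Pre_process_conceptnet_language_specific conceptnet_data language → Spec_process_conceptnet_language_specific conceptnet_data language (process_conceptnet_language_specific conceptnet_data language)

-- ===== LEMMAS AND PROOFS =====

-- split₀.go with a nonempty accumulator is the accumulator (reversed) followed by go with an empty one
theorem pv_go_acc (s : List Char) : ∀ cur acc, PySem.Chars.split₀.go s cur acc = acc.reverse ++ PySem.Chars.split₀.go s cur [] := by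
  induction s with
  | nil => intro cur acc; simp [PySem.Chars.split₀.go]; split <;> simp
  | cons c rest ih =>
    intro cur acc
    simp only [PySem.Chars.split₀.go]
    split
    · split
      · exact ih _ _
      · rw [ih [] (cur.reverse :: acc), ih [] [cur.reverse]]; simp
    · exact ih _ _

-- the state machine computes exactly Python's no-arg split of the remaining characters
theorem pv_tok_go (s : List Char) : ∀ cur tokens, pvTokChars s cur tokens = tokens ++ (PySem.Chars.split₀.go s cur.reverse []).map String.ofList := by
  induction s with
  | nil =>
    intro cur tokens
    simp only [pvTokChars, PySem.Chars.split₀.go]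
    by_cases h : cur.isEmpty
    · simp [h]
    · simp [h]
  | cons c rest ih =>
    intro cur tokens
    simp only [pvTokChars, PySem.Chars.split₀.go]
    split
    · by_cases h : cur.isEmpty
      · simp [h, ih]
      · simp only [h, List.isEmpty_reverse, if_neg, Bool.false_eq_true, not_false_eq_true]
        rw [ih, pv_go_acc rest [] [cur.reverse.reverse]]
        simp
    · rw [ih]
      simp

theorem pv_tok_eq_split (v : String) (tokens : List String) : pvTokChars v.toList [] tokens = tokens ++ PySem.Str.split₀ v := by
  rw [pv_tok_go]; rfl

-- ===== VERDICT (by name: the statement is the Claim_ definition above) =====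
theorem process_conceptnet_language_specific_spec : Claim_equal_process_conceptnet_language_specific := by
  intro cd lang _ _
  unfold Spec_process_conceptnet_language_specific
  unfold process_conceptnet_language_specific process_conceptnet_language_specific_alt
  cases h : (PySem.Dict.mk cd).get? lang with
  | none => rfl
  | some inner =>
    have hf : (fun (tokens : List String) (v : String) => tokens ++ PySem.Str.split₀ v)
        = (fun tokens v => pvTokChars v.toList [] tokens) := by
      funext tokens v; rw [pv_tok_eq_split]
    simp only [hf]
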